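-- pv_equiv track=rewrite | github.com/GiulioCMSanto/DSF_Udacity_Project_I | chicago_bikeshare_pt.py | count_user_types
-- ===== SOURCE A (Python) =====
-- def column_to_list(data, index):
--     """
--       Cria uma lista de colunas a partir de uma lista de listas.
--       Argumentos:
--           param1: uma lista de listas.
--           param2: O índice das colunas que serão transformadas em uma lista.
--       Retorna:
--           Uma lista de colunas.
--       """
--     column_list = []
--     for line in range(len(data)):
--         column_list.append(data[line][index])
--     return column_list
--
-- def count_user_types(data_list):
--     """
--     Retorna uma lista com o número de User_Types no seguinte formato:
--     [count_subscriber,count_customer, count_dependent].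
--     Arguments:
--         param1: uma lista de dados.
--     Retorna:
--         Uma lista com o número de Cada User Type(Subscriber, Customer e Dependent).
--     """
--     subscriber = 0
--     customer = 0
--     dependent = 0
--     for column in column_to_list(data_list, -3):
--         if column == "Subscriber":
--             subscriber += 1
--         elif column == "Customer":
--             customer += 1
--         else:
--             dependent += 1
--
--     return [subscriber, customer, dependent]
-- ===== SOURCE B (Python) =====
-- def count_user_types(data_list):
--     """
--     Retorna uma lista com o número de User_Types no seguinte formato:
--     [count_subscriber, count_customer, count_dependent].
--     """
--     tally = {}
--     for row in data_list:
--         key = row[-3]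
--         tally[key] = tally.get(key, 0) + 1
--     subscriber = tally.get("Subscriber", 0)
--     customer = tally.get("Customer", 0)
--     return [subscriber, customer, len(data_list) - subscriber - customer]
-- ===== Notes on version B (the rewrite author's own statement) =====
-- stated objective: alternative
-- what changed: B builds a frequency tally (dict) of column -3 in one pass and reads subscriber/customer from it, computing dependent as len(data_list) minus the other two instead of a third branch; A first materialises the column list and classifies each value with an if/elif/else triple of counters.
import Mathlib
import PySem

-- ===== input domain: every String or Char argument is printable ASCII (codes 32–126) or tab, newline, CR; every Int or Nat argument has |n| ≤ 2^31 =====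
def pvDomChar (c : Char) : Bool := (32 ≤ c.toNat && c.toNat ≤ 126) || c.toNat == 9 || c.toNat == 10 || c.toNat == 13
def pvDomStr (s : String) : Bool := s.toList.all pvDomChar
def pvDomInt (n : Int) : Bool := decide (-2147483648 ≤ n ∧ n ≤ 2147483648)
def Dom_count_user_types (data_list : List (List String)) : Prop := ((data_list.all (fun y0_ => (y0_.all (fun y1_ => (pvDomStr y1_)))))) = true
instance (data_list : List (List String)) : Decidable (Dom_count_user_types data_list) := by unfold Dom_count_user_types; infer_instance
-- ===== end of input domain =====

-- B replaces A's column-extraction + if/elif/else counters with a one-pass dict tally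
-- of column -3, deriving the "dependent" count by subtraction (alternative decomposition).


-- ===== PORT A =====
-- column_to_list: loop over range(len(data)) appending data[line][index];
-- out-of-range row access is defaulted to "" — Pre_ excludes those inputs (Python raises IndexError).
def column_to_list (data : List (List String)) (index : Int) : List String :=
  (PySem.List.pyRange 0 (data.length : Int) 1).foldl
    (fun acc line =>
      acc ++ [(PySem.List.pyGet? ((PySem.List.pyGet? data line).getD []) index).getD ""]) []

def count_user_types (data_list : List (List String)) : List Int :=
  let r := (column_to_list data_list (-3)).foldl
    (fun (acc : Int × Int × Int) column =>
      if column = "Subscriber" then (acc.1 + 1, acc.2.1, acc.2.2)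
      else if column = "Customer" then (acc.1, acc.2.1 + 1, acc.2.2)
      else (acc.1, acc.2.1, acc.2.2 + 1)) (0, 0, 0)
  [r.1, r.2.1, r.2.2]

-- ===== PORT B =====
def count_user_types_alt (data_list : List (List String)) : List Int :=
  let tally := data_list.foldl
    (fun (t : PySem.Dict String Int) row =>
      let key := (PySem.List.pyGet? row (-3)).getD ""
      t.insert key (t.getD key 0 + 1)) PySem.Dict.empty
  let subscriber := tally.getD "Subscriber" 0
  let customer := tally.getD "Customer" 0
  [subscriber, customer, (data_list.length : Int) - subscriber - customer]

-- ===== PRECONDITION & SPEC =====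
-- Pre_: every row has at least 3 entries, so row[-3] never raises IndexError in Python.
def Pre_count_user_types (data_list : List (List String)) : Prop :=
  ∀ row ∈ data_list, 3 ≤ row.length
instance (data_list : List (List String)) : Decidable (Pre_count_user_types data_list) := by
  unfold Pre_count_user_types; infer_instance
def pvWitness_count_user_types : List (List String) :=
  [["a", "Subscriber", "x", "y"], ["b", "Customer", "z"], ["c", "Dependent", "w"]]
def Spec_count_user_types (data_list : List (List String)) (out : List Int) : Prop :=
  out = count_user_types_alt data_list
instance (data_list : List (List String)) (out : List Int) : Decidable (Spec_count_user_types data_list out) := by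
  unfold Spec_count_user_types; infer_instance

-- ===== CLAIM (what is proved, stated in full; the proofs are below) =====
def Claim_equal_count_user_types : Prop := ∀ (data_list : List (List String)), Dom_count_user_types data_list → Pre_count_user_types data_list → Spec_count_user_types data_list (count_user_types data_list)

-- ===== LEMMAS AND PROOFS =====

-- the per-row key both programs extract (row[-3], defaulted outside Pre_)
def pvKey (row : List String) : String := (PySem.List.pyGet? row (-3)).getD ""

lemma column_to_list_eq_map (data : List (List String)) :
    column_to_list data (-3) = data.map pvKey := by
  unfold column_to_list
  rw [PySem.List.foldl_append_singleton_eq_map]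
  have h : (fun line => (PySem.List.pyGet? ((PySem.List.pyGet? data line).getD []) (-3)).getD "")
      = (pvKey ∘ fun j => PySem.List.pyGetD data j []) := by
    funext line; simp [pvKey, PySem.List.pyGetD]
  rw [h, ← List.map_map]
  rw [show PySem.List.pyRange 0 (data.length : Int) 1
        = PySem.List.pyRange 0 (PySem.List.len data) from rfl]
  rw [PySem.List.map_pyGetD_pyRange_zero]
  rfl

lemma tripleFold_char (l : List String) (a b c : Int) :
    l.foldl (fun (acc : Int × Int × Int) column =>
      if column = "Subscriber" then (acc.1 + 1, acc.2.1, acc.2.2)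
      else if column = "Customer" then (acc.1, acc.2.1 + 1, acc.2.2)
      else (acc.1, acc.2.1, acc.2.2 + 1)) (a, b, c)
    = (a + l.count "Subscriber", b + l.count "Customer",
       c + ((l.length : Int) - l.count "Subscriber" - l.count "Customer")) := by
  induction l generalizing a b c with
  | nil => simp
  | cons x t ih =>
      simp only [List.foldl_cons]
      have cS : (x :: t).count "Subscriber"
          = t.count "Subscriber" + (if x = "Subscriber" then 1 else 0) := by
        simp [List.count_cons]
      have cC : (x :: t).count "Customer"
          = t.count "Customer" + (if x = "Customer" then 1 else 0) := by
        simp [List.count_cons]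
      by_cases h1 : x = "Subscriber"
      · rw [if_pos h1, ih]
        simp only [cS, cC, if_pos h1, List.length_cons, Prod.mk.injEq]
        have h2 : ¬ x = "Customer" := by rw [h1]; decide
        rw [if_neg h2]
        refine ⟨by push_cast; ring, by push_cast; ring, by push_cast; ring⟩
      · by_cases h2 : x = "Customer"
        · rw [if_neg h1, if_pos h2, ih]
          simp only [cS, cC, if_pos h2, if_neg h1, List.length_cons, Prod.mk.injEq]
          refine ⟨by push_cast; ring, by push_cast; ring, by push_cast; ring⟩
        · rw [if_neg h1, if_neg h2, ih]
          simp only [cS, cC, if_neg h1, if_neg h2, List.length_cons, Prod.mk.injEq]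
          refine ⟨by push_cast; ring, by push_cast; ring, by push_cast; ring⟩

lemma tallyFold_getD (l : List (List String)) (t : PySem.Dict String Int) (k : String) :
    ((l.foldl (fun (t : PySem.Dict String Int) row =>
        let key := pvKey row
        t.insert key (t.getD key 0 + 1)) t).getD k 0)
    = t.getD k 0 + ((l.map pvKey).count k : Int) := by
  induction l generalizing t with
  | nil => simp
  | cons h r ih =>
      simp only [List.foldl_cons, List.map_cons, List.count_cons]
      rw [ih, PySem.Dict.getD_insert]
      by_cases hk : k = pvKey h
      · simp [hk]
        ring
      · have e : (pvKey h == k) = false := by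
          simpa using fun e => hk e.symm
        simp [hk, e]

-- ===== VERDICT (by name: the statement is the Claim_ definition above) =====
theorem count_user_types_spec : Claim_equal_count_user_types := by
  intro data_list _ _
  unfold Spec_count_user_types count_user_types count_user_types_alt
  rw [column_to_list_eq_map, tripleFold_char]
  have hs := tallyFold_getD data_list PySem.Dict.empty "Subscriber"
  have hc := tallyFold_getD data_list PySem.Dict.empty "Customer"
  simp only [pvKey] at hs hc ⊢
  simp only [hs, hc, PySem.Dict.getD_empty]
  simp
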